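-- pv_equiv track=rewrite | github.com/anunkai1/matrix | src/telegram_bridge/handlers.py | parse_dishframed_cli_output
-- ===== SOURCE A (Python) =====
-- from typing import Any, Callable, Dict, List, Optional, Set, Tuple
--
-- def parse_dishframed_cli_output(stdout: str) -> tuple[Optional[str], str]:
--     output_path: Optional[str] = None
--     preview_text = ""
--     for raw_line in (stdout or "").splitlines():
--         line = raw_line.strip()
--         if line.startswith("Output:"):
--             candidate = line.split(":", 1)[1].strip()
--             if candidate:
--                 output_path = candidate
--             continue
--         if line:
--             preview_text = line
--     return output_path, preview_text
-- ===== SOURCE B (Python) =====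
-- def parse_dishframed_cli_output(stdout):
--     lines = [ln.strip() for ln in (stdout or "").splitlines()]
--     output_path = None
--     preview_text = ""
--     out_found = False
--     prev_found = False
--     for line in reversed(lines):
--         if line.startswith("Output:"):
--             if not out_found:
--                 candidate = line.split(":", 1)[1].strip()
--                 if candidate:
--                     output_path = candidate
--                     out_found = True
--         elif line and not prev_found:
--             preview_text = line
--             prev_found = True
--         if out_found and prev_found:
--             break
--     return output_path, preview_text
-- ===== Notes on version B (the rewrite author's own statement) =====
-- stated objective: alternative
-- what changed: B strips the lines once, then does a single backward scan with found-flags that takes the first (i.e. last-in-file) non-empty Output: candidate and the first non-Output non-empty line and breaks as soon as both are fixed, instead of A's forward fold that keeps overwriting both values.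
import Mathlib
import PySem

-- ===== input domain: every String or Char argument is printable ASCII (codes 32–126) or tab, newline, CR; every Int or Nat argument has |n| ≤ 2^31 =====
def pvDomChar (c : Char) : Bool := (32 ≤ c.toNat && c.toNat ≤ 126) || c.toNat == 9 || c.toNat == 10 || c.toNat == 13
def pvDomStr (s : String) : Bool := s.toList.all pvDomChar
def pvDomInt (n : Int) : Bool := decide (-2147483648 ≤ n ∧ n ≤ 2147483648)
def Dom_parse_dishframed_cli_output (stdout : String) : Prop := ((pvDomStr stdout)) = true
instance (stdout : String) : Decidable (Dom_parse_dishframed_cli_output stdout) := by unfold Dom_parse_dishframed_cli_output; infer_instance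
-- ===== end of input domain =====

-- B replaces A's forward fold over all lines by a single backward scan with found-flags
-- that stops as soon as both the output path and the preview line are fixed (objective: alternative).


-- ===== PORT A =====
-- loop body of A: strip the raw line, record an Output: candidate or the preview line.
-- line.split(":", 1)[1] is ported with pyGetD: under the startswith guard the line contains
-- ':' so the split has exactly two parts and index 1 never raises (exact there).
def pvStepA (st : Option String × String) (raw_line : String) : Option String × String :=
  let line := PySem.Str.strip raw_line
  if PySem.Str.startswith line "Output:" then
    let candidate := PySem.Str.strip (PySem.List.pyGetD ((PySem.Str.splitMax? line ":" 1).getD []) 1 "")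
    if candidate ≠ "" then (some candidate, st.2) else st
  else if line ≠ "" then (st.1, line)
  else st

def parse_dishframed_cli_output (stdout : String) : Option String × String :=
  (PySem.Str.splitlines stdout).foldl pvStepA (none, "")

-- ===== PORT B =====
-- B's backward loop over the stripped lines, with found-flags and the early break.
def pvAltGo : List String → Option String → String → Bool → Bool → Option String × String
  | [], op, pv, _, _ => (op, pv)
  | line :: rest, op, pv, of, pf =>
    let s : Option String × String × Bool × Bool :=
      if PySem.Str.startswith line "Output:" then
        if !of then
          let candidate := PySem.Str.strip (PySem.List.pyGetD ((PySem.Str.splitMax? line ":" 1).getD []) 1 "")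
          if candidate ≠ "" then (some candidate, pv, true, pf) else (op, pv, of, pf)
        else (op, pv, of, pf)
      else if line ≠ "" && !pf then (op, line, of, true)
      else (op, pv, of, pf)
    if s.2.2.1 && s.2.2.2 then (s.1, s.2.1)
    else pvAltGo rest s.1 s.2.1 s.2.2.1 s.2.2.2

def parse_dishframed_cli_output_alt (stdout : String) : Option String × String :=
  pvAltGo (((PySem.Str.splitlines stdout).map PySem.Str.strip).reverse) none "" false false

-- ===== PRECONDITION & SPEC =====
def Spec_parse_dishframed_cli_output (stdout : String) (out : Option String × String) : Prop := out = parse_dishframed_cli_output_alt stdout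
instance (stdout : String) (out : Option String × String) : Decidable (Spec_parse_dishframed_cli_output stdout out) := by unfold Spec_parse_dishframed_cli_output; infer_instance

-- ===== CLAIM (what is proved, stated in full; the proofs are below) =====
def Claim_equal_parse_dishframed_cli_output : Prop := ∀ (stdout : String), Dom_parse_dishframed_cli_output stdout → Spec_parse_dishframed_cli_output stdout (parse_dishframed_cli_output stdout)

-- ===== LEMMAS AND PROOFS =====

-- A's step on an already-stripped line
def pvStepS (st : Option String × String) (line : String) : Option String × String :=
  if PySem.Str.startswith line "Output:" then
    let candidate := PySem.Str.strip (PySem.List.pyGetD ((PySem.Str.splitMax? line ":" 1).getD []) 1 "")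
    if candidate ≠ "" then (some candidate, st.2) else st
  else if line ≠ "" then (st.1, line)
  else st

theorem pvStepA_eq (st : Option String × String) (raw : String) :
    pvStepA st raw = pvStepS st (PySem.Str.strip raw) := rfl

-- backward scan with flags = fold over the list, with the flags shielding the initial values
set_option maxHeartbeats 1000000 in
theorem pvAltGo_key (L : List String) : ∀ (op : Option String) (pv : String) (of pf : Bool),
    pvAltGo L.reverse op pv of pf =
      ((if of then op else (L.foldl pvStepS (none, "")).1.or op),
       (if pf then pv else
          if (L.foldl pvStepS (none, "")).2 ≠ "" then (L.foldl pvStepS (none, "")).2 else pv)) := by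
  induction L using List.reverseRecOn with
  | nil => intro op pv of pf; simp [pvAltGo]
  | append_singleton M x ih =>
    intro op pv of pf
    rw [List.reverse_append]
    simp only [List.reverse_singleton, List.singleton_append, List.foldl_append, List.foldl_cons,
      List.foldl_nil]
    set r := M.foldl pvStepS (none, "") with hr
    show pvAltGo (x :: M.reverse) op pv of pf = _
    unfold pvAltGo
    simp only [pvStepS]
    by_cases h1 : PySem.Str.startswith x "Output:" = true
    · simp only [h1, if_true]
      set c := PySem.Str.strip (PySem.List.pyGetD ((PySem.Str.splitMax? x ":" 1).getD []) 1 "") with hc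
      by_cases h2 : c = ""
      · simp only [h2]
        cases of <;> cases pf <;> first | (simp [ih, h2]) | rfl
      · cases of <;> cases pf <;> first | (simp [ih, h2]) | rfl
    · simp only [h1, if_false, Bool.false_eq_true]
      by_cases h3 : x = ""
      · subst h3
        cases of <;> cases pf <;> first | (simp [ih]) | rfl
      · cases of <;> cases pf <;> first | (simp [ih, h3]) | rfl

-- ===== VERDICT (by name: the statement is the Claim_ definition above) =====
theorem parse_dishframed_cli_output_spec : Claim_equal_parse_dishframed_cli_output := by
  intro stdout _
  show parse_dishframed_cli_output stdout = parse_dishframed_cli_output_alt stdout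
  unfold parse_dishframed_cli_output parse_dishframed_cli_output_alt
  rw [pvAltGo_key]
  have hmap : (PySem.Str.splitlines stdout).foldl pvStepA (none, "")
      = ((PySem.Str.splitlines stdout).map PySem.Str.strip).foldl pvStepS (none, "") := by
    rw [List.foldl_map]; simp only [← pvStepA_eq]
  rw [hmap]
  set r := ((PySem.Str.splitlines stdout).map PySem.Str.strip).foldl pvStepS (none, "") with hrr
  by_cases h : r.2 = "" <;> simp [h, Option.or_none, Prod.ext_iff]
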